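-- pv_equiv track=rewrite | github.com/chron-sugi/coresplorer | tools/json_generator/src/generate.py | collect_all_edges_for_node
-- ===== SOURCE A (Python) =====
-- from collections import defaultdict, deque
--
-- def collect_transitive_edges(
--     start_id: str,
--     adjacency: dict[str, list[str]],
--     direction: str,
-- ) -> list[tuple[str, str]]:
--     """
--     BFS traversal to collect ALL transitive edges from a starting node.
--
--     Args:
--         start_id: The node to start traversal from
--         adjacency: Adjacency list (outgoing for downstream, incoming for upstream)
--         direction: "downstream" or "upstream" - determines edge orientation
--
--     Returns:
--         List of (source, target) tuples representing edges
--     """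
--     edges: list[tuple[str, str]] = []
--     visited_edges: set[tuple[str, str]] = set()
--     visited_nodes: set[str] = {start_id}
--     queue: deque[str] = deque([start_id])
--
--     while queue:
--         current_id = queue.popleft()
--         neighbors = adjacency.get(current_id, [])
--
--         for neighbor in neighbors:
--             # Determine edge direction based on traversal direction
--             if direction == "downstream":
--                 edge = (current_id, neighbor)
--             else:  # upstream
--                 edge = (neighbor, current_id)
--
--             if edge not in visited_edges:
--                 visited_edges.add(edge)
--                 edges.append(edge)
--
--             if neighbor not in visited_nodes:
--                 visited_nodes.add(neighbor)
--                 queue.append(neighbor)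
--
--     return edges
--
-- def collect_all_edges_for_node(
--     node_id: str,
--     outgoing: dict[str, list[str]],
--     incoming: dict[str, list[str]],
-- ) -> list[dict[str, str]]:
--     """
--     Collect ALL edges needed to display the diagram for this node as core.
--
--     Includes:
--     - All downstream edges (transitive dependencies)
--     - All upstream edges (transitive dependents)
--
--     Returns:
--         Deduplicated list of {"source": str, "target": str} edges
--     """
--     all_edges: set[tuple[str, str]] = set()
--
--     # Collect downstream edges (follow outgoing from this node)
--     downstream_edges = collect_transitive_edges(node_id, outgoing, "downstream")
--     all_edges.update(downstream_edges)
--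
--     # Collect upstream edges (follow incoming to this node)
--     upstream_edges = collect_transitive_edges(node_id, incoming, "upstream")
--     all_edges.update(upstream_edges)
--
--     # Convert to list of dicts, sorted for deterministic output
--     return [{"source": s, "target": t} for s, t in sorted(all_edges)]
-- ===== SOURCE B (Python) =====
-- def collect_all_edges_for_node(node_id, outgoing, incoming):
--     """Two-phase rewrite: first compute the set of reachable nodes per direction
--     (plain DFS tracking only visited nodes), then enumerate each reachable
--     node's adjacency list to build the edge set; union, sort, emit dicts."""
--
--     def reachable(start, adj):
--         seen = {start}
--         order = [start]
--         stack = [start]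
--         while stack:
--             u = stack.pop()
--             for v in adj.get(u, []):
--                 if v not in seen:
--                     seen.add(v)
--                     order.append(v)
--                     stack.append(v)
--         return order
--
--     edges = set()
--     for u in reachable(node_id, outgoing):
--         for v in outgoing.get(u, []):
--             edges.add((u, v))
--     for u in reachable(node_id, incoming):
--         for v in incoming.get(u, []):
--             edges.add((v, u))
--     return [{"source": s, "target": t} for s, t in sorted(edges)]
-- ===== Notes on version B (the rewrite author's own statement) =====
-- stated objective: alternative
-- what changed: B separates reachability from edge collection: a plain DFS per direction computes only the set of reachable nodes, then a second pass enumerates each reachable node's adjacency list to build the edge set, instead of A's BFS that deduplicates and accumulates edges inline during traversal.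
import Mathlib
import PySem

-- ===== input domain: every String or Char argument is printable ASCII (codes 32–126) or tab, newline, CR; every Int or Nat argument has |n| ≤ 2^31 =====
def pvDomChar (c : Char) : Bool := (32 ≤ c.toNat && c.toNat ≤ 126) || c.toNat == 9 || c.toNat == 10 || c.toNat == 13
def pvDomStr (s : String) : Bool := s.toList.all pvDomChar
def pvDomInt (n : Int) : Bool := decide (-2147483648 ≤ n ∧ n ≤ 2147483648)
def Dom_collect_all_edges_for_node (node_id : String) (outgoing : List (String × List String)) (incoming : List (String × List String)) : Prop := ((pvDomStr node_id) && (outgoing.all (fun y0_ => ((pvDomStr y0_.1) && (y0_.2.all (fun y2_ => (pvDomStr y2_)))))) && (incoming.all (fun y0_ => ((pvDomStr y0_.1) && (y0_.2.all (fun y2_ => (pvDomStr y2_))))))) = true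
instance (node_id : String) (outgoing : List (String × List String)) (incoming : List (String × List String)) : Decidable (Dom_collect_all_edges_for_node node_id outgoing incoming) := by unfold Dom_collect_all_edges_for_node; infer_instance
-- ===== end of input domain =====

-- B re-implements A in two phases (reachability first, then edge enumeration); equivalence of RETURN values is proved (neither mutates its arguments).

-- ===== PORT A =====
-- loop state of A's BFS: (edges, visited_edges, visited_nodes, queue)
abbrev pvSt : Type := List (String × String) × PySem.Set (String × String) × PySem.Set String × List String

-- adjacency.get(current, []) on the association-list dict
def pvGetD (adjacency : List (String × List String)) (k : String) : List String :=
  PySem.Dict.getD ⟨adjacency⟩ k []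

-- the 'if direction == "downstream"' edge orientation of A's inner loop
def pvEdgeOf (direction current neighbor : String) : String × String :=
  if direction == "downstream" then (current, neighbor) else (neighbor, current)

-- body of A's 'for neighbor in neighbors' loop
def cteStep (direction current : String) (st : pvSt) (neighbor : String) : pvSt :=
  let edge := pvEdgeOf direction current neighbor
  let p := if PySem.Set.contains st.2.1 edge then (st.1, st.2.1)
           else (st.1 ++ [edge], PySem.Set.add st.2.1 edge)
  if PySem.Set.contains st.2.2.1 neighbor then (p.1, p.2, st.2.2.1, st.2.2.2)
  else (p.1, p.2, PySem.Set.add st.2.2.1 neighbor, st.2.2.2 ++ [neighbor])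

-- all strings that can ever be enqueued (termination measure only)
def pvUniverse (adjacency : List (String × List String)) : List String :=
  List.flatMap (fun kv => kv.2) adjacency

-- termination-measure helper: how many universe elements are not yet visited
def pvCnt (U : List String) (v : PySem.Set String) : Nat :=
  (U.filter (fun u => !(PySem.Set.contains v u))).length

lemma pv_mem_getD_universe (adjacency : List (String × List String)) (k n : String)
    (h : n ∈ pvGetD adjacency k) : n ∈ pvUniverse adjacency := by
  simp only [pvGetD, PySem.Dict.getD, PySem.Dict.get?] at h
  rcases hf : List.find? (fun p => p.1 == k) adjacency with _ | p
  · simp [hf] at h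
  · have hp : p ∈ adjacency := List.mem_of_find?_eq_some hf
    simp only [hf, Option.map_some, Option.getD_some] at h
    exact List.mem_flatMap.mpr ⟨p, hp, h⟩

lemma pvCnt_add_lt (U : List String) (v : PySem.Set String) (n : String)
    (hn : n ∈ U) (h : ¬ PySem.Set.contains v n = true) : pvCnt U (PySem.Set.add v n) < pvCnt U v := by
  have hnv : n ∉ v := fun hm => h ((PySem.Set.contains_iff v n).mpr hm)
  have himp : ∀ a, (!PySem.Set.contains (PySem.Set.add v n) a) = true →
      (!PySem.Set.contains v a) = true := by
    intro a ha
    simp only [Bool.not_eq_true', ← Bool.not_eq_true] at ha ⊢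
    intro hc
    exact ha ((PySem.Set.contains_iff _ a).mpr
      ((PySem.Set.mem_add v n a).mpr (Or.inl ((PySem.Set.contains_iff v a).mp hc))))
  have hsub := List.monotone_filter_right U himp
  have hle := hsub.length_le
  rcases Nat.lt_or_ge (U.filter (fun u => !PySem.Set.contains (PySem.Set.add v n) u)).length
      (U.filter (fun u => !PySem.Set.contains v u)).length with hlt | hge
  · exact hlt
  · exfalso
    have heq := hsub.eq_of_length (Nat.le_antisymm hle hge)
    have hmem : n ∈ U.filter (fun u => !PySem.Set.contains v u) := by
      simp only [List.mem_filter, Bool.not_eq_true', ← Bool.not_eq_true]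
      exact ⟨hn, by simpa using h⟩
    rw [← heq] at hmem
    simp only [List.mem_filter, Bool.not_eq_true'] at hmem
    have hct := (PySem.Set.contains_iff (PySem.Set.add v n) n).mpr
      ((PySem.Set.mem_add v n n).mpr (Or.inr rfl))
    rw [hmem.2] at hct
    exact Bool.false_ne_true hct

lemma cteFold_measure (direction current : String) (U : List String) (ns : List String)
    (hns : ∀ n ∈ ns, n ∈ U) (st : pvSt) :
    2 * pvCnt U ((ns.foldl (cteStep direction current) st).2.2.1)
      + ((ns.foldl (cteStep direction current) st).2.2.2).length
    ≤ 2 * pvCnt U st.2.2.1 + st.2.2.2.length := by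
  induction ns generalizing st with
  | nil => exact Nat.le_refl _
  | cons m ns ih =>
    have hstep : 2 * pvCnt U (cteStep direction current st m).2.2.1
        + (cteStep direction current st m).2.2.2.length
        ≤ 2 * pvCnt U st.2.2.1 + st.2.2.2.length := by
      unfold cteStep
      by_cases hm : m ∈ st.2.2.1
      · simp [hm]
      · have hlt := pvCnt_add_lt U st.2.2.1 m (hns m (List.mem_cons_self))
          (fun hc => hm ((PySem.Set.contains_iff st.2.2.1 m).mp hc))
        simp only [PySem.Set.add, PySem.Set.contains_iff, hm, if_false] at hlt
        simp [hm, List.length_append]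
        omega
    exact Nat.le_trans (ih (fun n hn => hns n (List.mem_cons_of_mem m hn)) _) hstep

-- A's 'while queue:' loop
def cteLoop (adjacency : List (String × List String)) (direction : String)
    (edges : List (String × String)) (visited_edges : PySem.Set (String × String))
    (visited_nodes : PySem.Set String) (queue : List String) : List (String × String) :=
  match queue with
  | [] => edges
  | current :: rest =>
    let st := (pvGetD adjacency current).foldl (cteStep direction current)
                (edges, visited_edges, visited_nodes, rest)
    cteLoop adjacency direction st.1 st.2.1 st.2.2.1 st.2.2.2
termination_by 2 * pvCnt (pvUniverse adjacency) visited_nodes + queue.length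
decreasing_by
  have h := cteFold_measure direction current (pvUniverse adjacency)
    (pvGetD adjacency current)
    (fun n hn => pv_mem_getD_universe adjacency current n hn)
    (edges, visited_edges, visited_nodes, rest)
  simp only [List.length_cons]
  simp only at h
  omega

def collect_transitive_edges (start_id : String) (adjacency : List (String × List String))
    (direction : String) : List (String × String) :=
  cteLoop adjacency direction [] PySem.Set.empty
    (PySem.Set.add PySem.Set.empty start_id) [start_id]

def collect_all_edges_for_node (node_id : String) (outgoing : List (String × List String)) (incoming : List (String × List String)) : List (List (String × String)) :=
  let all_edges : PySem.Set (String × String) := PySem.Set.empty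
  let downstream_edges := collect_transitive_edges node_id outgoing "downstream"
  let all_edges := PySem.Set.update all_edges downstream_edges
  let upstream_edges := collect_transitive_edges node_id incoming "upstream"
  let all_edges := PySem.Set.update all_edges upstream_edges
  (PySem.List.sorted2 all_edges Prod.fst Prod.snd).map (fun p => [("source", p.1), ("target", p.2)])

-- ===== PORT B =====
-- body of B's 'for v in adj.get(u, [])' loop; B's 'seen' set and 'order' list hold the
-- same distinct elements in the same first-insertion order, so one PySem.Set models both
def reachStep (st : PySem.Set String × List String) (v : String) : PySem.Set String × List String :=
  if PySem.Set.contains st.1 v then st else (PySem.Set.add st.1 v, st.2 ++ [v])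

lemma reachFold_measure (U : List String) (ns : List String) (hns : ∀ n ∈ ns, n ∈ U)
    (st : PySem.Set String × List String) :
    2 * pvCnt U ((ns.foldl reachStep st).1) + ((ns.foldl reachStep st).2).length
    ≤ 2 * pvCnt U st.1 + st.2.length := by
  induction ns generalizing st with
  | nil => exact Nat.le_refl _
  | cons m ns ih =>
    have hstep : 2 * pvCnt U (reachStep st m).1 + (reachStep st m).2.length
        ≤ 2 * pvCnt U st.1 + st.2.length := by
      unfold reachStep
      by_cases hm : m ∈ st.1
      · simp [hm]
      · have hlt := pvCnt_add_lt U st.1 m (hns m (List.mem_cons_self))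
          (fun hc => hm ((PySem.Set.contains_iff st.1 m).mp hc))
        simp only [PySem.Set.add, PySem.Set.contains_iff, hm, if_false] at hlt
        simp [hm, List.length_append]
        omega
    exact Nat.le_trans (ih (fun n hn => hns n (List.mem_cons_of_mem m hn)) _) hstep

-- B's 'while stack:' DFS loop (stack.pop() pops from the end)
def reachLoop (adjacency : List (String × List String))
    (seen : PySem.Set String) (stack : List String) : PySem.Set String :=
  if h : stack = [] then seen
  else
    let u := stack.getLast h
    let st := (pvGetD adjacency u).foldl reachStep (seen, stack.dropLast)
    reachLoop adjacency st.1 st.2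
termination_by 2 * pvCnt (pvUniverse adjacency) seen + stack.length
decreasing_by
  have hm := reachFold_measure (pvUniverse adjacency) (pvGetD adjacency (stack.getLast h))
    (fun n hn => pv_mem_getD_universe adjacency (stack.getLast h) n hn) (seen, stack.dropLast)
  have hl : stack.dropLast.length = stack.length - 1 := List.length_dropLast
  have hpos : 0 < stack.length := List.length_pos_iff.mpr h
  simp only at hm
  omega

def pvReachable (start : String) (adjacency : List (String × List String)) : PySem.Set String :=
  reachLoop adjacency (PySem.Set.add PySem.Set.empty start) [start]

def collect_all_edges_for_node_alt (node_id : String) (outgoing : List (String × List String)) (incoming : List (String × List String)) : List (List (String × String)) :=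
  let edges0 : PySem.Set (String × String) := PySem.Set.empty
  let edges1 := (pvReachable node_id outgoing).foldl
    (fun es u => (pvGetD outgoing u).foldl (fun es v => PySem.Set.add es (u, v)) es) edges0
  let edges2 := (pvReachable node_id incoming).foldl
    (fun es u => (pvGetD incoming u).foldl (fun es v => PySem.Set.add es (v, u)) es) edges1
  (PySem.List.sorted2 edges2 Prod.fst Prod.snd).map (fun p => [("source", p.1), ("target", p.2)])

-- ===== PRECONDITION & SPEC =====
def Spec_collect_all_edges_for_node (node_id : String) (outgoing : List (String × List String)) (incoming : List (String × List String)) (out : List (List (String × String))) : Prop := out = collect_all_edges_for_node_alt node_id outgoing incoming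
instance (node_id : String) (outgoing : List (String × List String)) (incoming : List (String × List String)) (out : List (List (String × String))) : Decidable (Spec_collect_all_edges_for_node node_id outgoing incoming out) := by unfold Spec_collect_all_edges_for_node; infer_instance

-- ===== CLAIM (what is proved, stated in full; the proofs are below) =====
def Claim_equal_collect_all_edges_for_node : Prop := ∀ (node_id : String) (outgoing : List (String × List String)) (incoming : List (String × List String)), Dom_collect_all_edges_for_node node_id outgoing incoming → Spec_collect_all_edges_for_node node_id outgoing incoming (collect_all_edges_for_node node_id outgoing incoming)

-- ===== LEMMAS AND PROOFS =====

-- reachability from a set S of start nodes along the adjacency map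
inductive PvReach (adjacency : List (String × List String)) (S : List String) : String → Prop
  | base (u : String) : u ∈ S → PvReach adjacency S u
  | step (u v : String) : PvReach adjacency S u → v ∈ pvGetD adjacency u → PvReach adjacency S v

lemma PvReach_closed (adjacency : List (String × List String)) (V : List String)
    (hcl : ∀ u ∈ V, ∀ m ∈ pvGetD adjacency u, m ∈ V) :
    ∀ x, PvReach adjacency V x → x ∈ V := by
  intro x hx
  induction hx with
  | base u hu => exact hu
  | step u v _ hv ih => exact hcl u ih v hv

lemma PvReach_mono (adjacency : List (String × List String)) (S S' : List String)
    (hS : ∀ x ∈ S, x ∈ S') (x : String) (h : PvReach adjacency S x) : PvReach adjacency S' x := by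
  induction h with
  | base u hu => exact .base u (hS u hu)
  | step u v _ hv ih => exact .step u v ih hv

-- membership characterisation of one cteStep
lemma cteStep_char (direction current n : String) (st : pvSt)
    (I1 : ∀ e, e ∈ st.2.1 ↔ e ∈ st.1) :
    (∀ e, e ∈ (cteStep direction current st n).1 ↔ e ∈ st.1 ∨ e = pvEdgeOf direction current n) ∧
    (∀ e, e ∈ (cteStep direction current st n).2.1 ↔ e ∈ (cteStep direction current st n).1) ∧
    (∀ x, x ∈ (cteStep direction current st n).2.2.1 ↔ x ∈ st.2.2.1 ∨ x = n) ∧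
    (∀ x, x ∈ (cteStep direction current st n).2.2.2 ↔ x ∈ st.2.2.2 ∨ (x = n ∧ x ∉ st.2.2.1)) := by
  unfold cteStep
  by_cases he : pvEdgeOf direction current n ∈ st.2.1 <;>
    by_cases hn : n ∈ st.2.2.1 <;>
    simp [he, hn, I1 _]
  all_goals try refine ⟨?_, ?_⟩
  all_goals
    first
    | exact (I1 _).mp he
    | (intro x; by_cases hx : x = n <;> simp [hx, hn])

-- membership characterisation of the whole neighbour fold
lemma cteFold_char (direction current : String) (ns : List String) :
    ∀ st : pvSt, (∀ e, e ∈ st.2.1 ↔ e ∈ st.1) →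
    (∀ e, e ∈ (ns.foldl (cteStep direction current) st).1 ↔
          e ∈ st.1 ∨ ∃ n ∈ ns, e = pvEdgeOf direction current n) ∧
    (∀ e, e ∈ (ns.foldl (cteStep direction current) st).2.1 ↔
          e ∈ (ns.foldl (cteStep direction current) st).1) ∧
    (∀ x, x ∈ (ns.foldl (cteStep direction current) st).2.2.1 ↔ x ∈ st.2.2.1 ∨ x ∈ ns) ∧
    (∀ x, x ∈ (ns.foldl (cteStep direction current) st).2.2.2 ↔
          x ∈ st.2.2.2 ∨ (x ∈ ns ∧ x ∉ st.2.2.1)) := by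
  induction ns with
  | nil =>
    intro st I1
    exact ⟨by simp, by simpa using I1, by simp, by simp⟩
  | cons n ns ih =>
    intro st I1
    obtain ⟨hc1, hc2, hc3, hc4⟩ := cteStep_char direction current n st I1
    obtain ⟨h1, h2, h3, h4⟩ := ih (cteStep direction current st n) hc2
    refine ⟨?_, ?_, ?_, ?_⟩
    · intro e
      simp only [List.foldl_cons]
      rw [h1 e, hc1 e]
      simp only [List.mem_cons]
      constructor
      · rintro ((h | h) | ⟨m, hm, he⟩)
        · exact Or.inl h
        · exact Or.inr ⟨n, Or.inl rfl, h⟩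
        · exact Or.inr ⟨m, Or.inr hm, he⟩
      · rintro (h | ⟨m, (rfl | hm), he⟩)
        · exact Or.inl (Or.inl h)
        · exact Or.inl (Or.inr he)
        · exact Or.inr ⟨m, hm, he⟩
    · intro e
      simpa only [List.foldl_cons] using h2 e
    · intro x
      simp only [List.foldl_cons]
      rw [h3 x, hc3 x]
      simp only [List.mem_cons]
      tauto
    · intro x
      simp only [List.foldl_cons]
      rw [h4 x, hc4 x]
      simp only [List.mem_cons]
      constructor
      · rintro ((h | ⟨rfl, hnn⟩) | ⟨hns', hnot⟩)
        · exact Or.inl h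
        · exact Or.inr ⟨Or.inl rfl, hnn⟩
        · exact Or.inr ⟨Or.inr hns', fun hx => hnot ((hc3 x).mpr (Or.inl hx))⟩
      · rintro (h | ⟨(rfl | hm), hnot⟩)
        · exact Or.inl (Or.inl h)
        · exact Or.inl (Or.inr ⟨rfl, hnot⟩)
        · by_cases hxn : x = n
          · exact Or.inl (Or.inr ⟨hxn, hnot⟩)
          · exact Or.inr ⟨hm, fun hx => ((hc3 x).mp hx).elim hnot hxn⟩

lemma cteLoop_complete (adjacency : List (String × List String)) (direction : String) :
    ∀ (E : List (String × String)) (VE : PySem.Set (String × String))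
      (V : PySem.Set String) (Q : List String),
    (∀ e, e ∈ VE ↔ e ∈ E) →
    (∀ u ∈ V, u ∈ Q ∨ (∀ n ∈ pvGetD adjacency u,
        pvEdgeOf direction u n ∈ E ∧ n ∈ V)) →
    ∀ x, PvReach adjacency V x → ∀ n ∈ pvGetD adjacency x,
      pvEdgeOf direction x n ∈ cteLoop adjacency direction E VE V Q := by
  intro E VE V Q
  induction E, VE, V, Q using cteLoop.induct adjacency direction with
  | case1 E VE V =>
    intro I1 H1 x hx n hn
    have hclosed : ∀ u ∈ V, ∀ m ∈ pvGetD adjacency u, pvEdgeOf direction u m ∈ E ∧ m ∈ V := by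
      intro u hu
      exact (H1 u hu).resolve_left (by simp)
    have hxV : x ∈ V :=
      PvReach_closed adjacency V (fun u hu m hm => (hclosed u hu m hm).2) x hx
    rw [cteLoop]
    exact (hclosed x hxV n hn).1
  | case2 E VE V current rest st ih =>
    intro I1 H1 x hx n hn
    obtain ⟨f1, f2, f3, f4⟩ := cteFold_char direction current (pvGetD adjacency current) (E, VE, V, rest) I1
    rw [cteLoop]
    apply ih f2
    · intro u hu
      by_cases hv : u ∈ V
      · rcases H1 u hv with hq | hdone
        · rcases List.mem_cons.mp hq with rfl | hrest
          · right
            intro m hm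
            exact ⟨(f1 _).mpr (Or.inr ⟨m, hm, rfl⟩), (f3 m).mpr (Or.inr hm)⟩
          · left
            exact (f4 u).mpr (Or.inl hrest)
        · right
          intro m hm
          exact ⟨(f1 _).mpr (Or.inl (hdone m hm).1), (f3 m).mpr (Or.inl (hdone m hm).2)⟩
      · have hns : u ∈ pvGetD adjacency current := ((f3 u).mp hu).resolve_left hv
        left
        exact (f4 u).mpr (Or.inr ⟨hns, hv⟩)
    · exact PvReach_mono adjacency V _ (fun y hy => (f3 y).mpr (Or.inl hy)) x hx
    · exact hn

lemma cteLoop_sound (adjacency : List (String × List String)) (direction : String) (S : List String) :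
    ∀ (E : List (String × String)) (VE : PySem.Set (String × String))
      (V : PySem.Set String) (Q : List String),
    (∀ e, e ∈ VE ↔ e ∈ E) →
    (∀ u ∈ V, PvReach adjacency S u) → (∀ u ∈ Q, PvReach adjacency S u) →
    (∀ e ∈ E, ∃ u, PvReach adjacency S u ∧ ∃ n ∈ pvGetD adjacency u,
        e = pvEdgeOf direction u n) →
    ∀ e ∈ cteLoop adjacency direction E VE V Q,
      ∃ u, PvReach adjacency S u ∧ ∃ n ∈ pvGetD adjacency u,
        e = pvEdgeOf direction u n := by
  intro E VE V Q
  induction E, VE, V, Q using cteLoop.induct adjacency direction with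
  | case1 E VE V =>
    intro I1 hV hQ hE e he
    rw [cteLoop] at he
    exact hE e he
  | case2 E VE V current rest st ih =>
    intro I1 hV hQ hE e he
    rw [cteLoop] at he
    obtain ⟨f1, f2, f3, f4⟩ := cteFold_char direction current (pvGetD adjacency current) (E, VE, V, rest) I1
    have hcur : PvReach adjacency S current := hQ current List.mem_cons_self
    refine ih f2 ?_ ?_ ?_ e he
    · intro u hu
      rcases (f3 u).mp hu with h | h
      · exact hV u h
      · exact .step current u hcur h
    · intro u hu
      rcases (f4 u).mp hu with h | h
      · exact hQ u (List.mem_cons_of_mem current h)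
      · exact .step current u hcur h.1
    · intro e' he'
      rcases (f1 e').mp he' with h | ⟨m, hm, rfl⟩
      · exact hE e' h
      · exact ⟨current, hcur, m, hm, rfl⟩

lemma cte_char (start_id : String) (adjacency : List (String × List String)) (direction : String)
    (e : String × String) :
    e ∈ collect_transitive_edges start_id adjacency direction ↔
    ∃ u, PvReach adjacency [start_id] u ∧ ∃ n ∈ pvGetD adjacency u,
      e = pvEdgeOf direction u n := by
  have hVmem : ∀ x, x ∈ PySem.Set.add PySem.Set.empty start_id ↔ x = start_id := by
    intro x
    rw [PySem.Set.mem_add]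
    simp [PySem.Set.empty]
  unfold collect_transitive_edges
  constructor
  · intro he
    refine cteLoop_sound adjacency direction [start_id] _ _ _ _ ?_ ?_ ?_ ?_ e he
    · simp [PySem.Set.empty]
    · intro u hu
      exact .base u (by simpa using (hVmem u).mp hu)
    · intro u hu
      exact .base u hu
    · simp
  · rintro ⟨u, hu, n, hn, rfl⟩
    refine cteLoop_complete adjacency direction _ _ _ _ ?_ ?_ u ?_ n hn
    · simp [PySem.Set.empty]
    · intro v hv
      left
      simpa using (hVmem v).mp hv
    · exact PvReach_mono adjacency [start_id] _
        (fun y hy => (hVmem y).mpr (by simpa using hy)) u hu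

-- membership characterisation of B's neighbour fold and DFS loop
lemma reachFold_char (ns : List String) :
    ∀ st : PySem.Set String × List String,
    (∀ x, x ∈ (ns.foldl reachStep st).1 ↔ x ∈ st.1 ∨ x ∈ ns) ∧
    (∀ x, x ∈ (ns.foldl reachStep st).2 ↔ x ∈ st.2 ∨ (x ∈ ns ∧ x ∉ st.1)) := by
  induction ns with
  | nil =>
    intro st
    exact ⟨by simp, by simp⟩
  | cons n ns ih =>
    intro st
    have hc1 : ∀ x, x ∈ (reachStep st n).1 ↔ x ∈ st.1 ∨ x = n := by
      intro x
      unfold reachStep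
      by_cases hn : n ∈ st.1 <;> by_cases hx : x = n <;>
        simp [hn, hx]
    have hc2 : ∀ x, x ∈ (reachStep st n).2 ↔ x ∈ st.2 ∨ (x = n ∧ x ∉ st.1) := by
      intro x
      unfold reachStep
      by_cases hn : n ∈ st.1 <;> by_cases hx : x = n <;>
        simp [hn, hx]
    obtain ⟨h1, h2⟩ := ih (reachStep st n)
    refine ⟨?_, ?_⟩
    · intro x
      simp only [List.foldl_cons]
      rw [h1 x, hc1 x]
      simp only [List.mem_cons]
      tauto
    · intro x
      simp only [List.foldl_cons]
      rw [h2 x, hc2 x]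
      simp only [List.mem_cons]
      constructor
      · rintro ((h | ⟨rfl, hnn⟩) | ⟨hns', hnot⟩)
        · tauto
        · tauto
        · exact Or.inr ⟨Or.inr hns', fun hx => hnot ((hc1 x).mpr (Or.inl hx))⟩
      · rintro (h | ⟨(rfl | hm), hnot⟩)
        · tauto
        · exact Or.inl (Or.inr ⟨rfl, hnot⟩)
        · by_cases hxn : x = n
          · exact Or.inl (Or.inr ⟨hxn, hnot⟩)
          · exact Or.inr ⟨hm, fun hx => ((hc1 x).mp hx).elim hnot hxn⟩

lemma reachLoop_complete (adjacency : List (String × List String)) :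
    ∀ (seen : PySem.Set String) (stack : List String),
    (∀ u ∈ seen, u ∈ stack ∨ (∀ n ∈ pvGetD adjacency u, n ∈ seen)) →
    ∀ x, PvReach adjacency seen x → x ∈ reachLoop adjacency seen stack := by
  intro seen stack
  induction seen, stack using reachLoop.induct adjacency with
  | case1 seen =>
    intro H1 x hx
    rw [reachLoop]
    have hcl : ∀ u ∈ seen, ∀ m ∈ pvGetD adjacency u, m ∈ seen := by
      intro u hu
      exact (H1 u hu).resolve_left (by simp)
    simpa using PvReach_closed adjacency seen hcl x hx
  | case2 seen stack h u st ih =>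
    intro H1 x hx
    rw [reachLoop]
    simp only [h, dite_false]
    obtain ⟨f1, f2⟩ := reachFold_char (pvGetD adjacency (stack.getLast h)) (seen, stack.dropLast)
    have hstackmem : ∀ y, y ∈ stack ↔ y ∈ stack.dropLast ∨ y = stack.getLast h := by
      intro y
      conv_lhs => rw [← List.dropLast_append_getLast h]
      simp
    apply ih
    · intro v hv
      by_cases hvseen : v ∈ seen
      · rcases H1 v hvseen with hq | hdone
        · rcases (hstackmem v).mp hq with hrest | rfl
          · left
            exact (f2 v).mpr (Or.inl hrest)
          · right
            intro m hm
            exact (f1 m).mpr (Or.inr hm)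
        · right
          intro m hm
          exact (f1 m).mpr (Or.inl (hdone m hm))
      · have hns : v ∈ pvGetD adjacency (stack.getLast h) := ((f1 v).mp hv).resolve_left hvseen
        left
        exact (f2 v).mpr (Or.inr ⟨hns, hvseen⟩)
    · exact PvReach_mono adjacency seen _ (fun y hy => (f1 y).mpr (Or.inl hy)) x hx

lemma reachLoop_sound (adjacency : List (String × List String)) (S : List String) :
    ∀ (seen : PySem.Set String) (stack : List String),
    (∀ u ∈ seen, PvReach adjacency S u) → (∀ u ∈ stack, PvReach adjacency S u) →
    ∀ x ∈ reachLoop adjacency seen stack, PvReach adjacency S x := by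
  intro seen stack
  induction seen, stack using reachLoop.induct adjacency with
  | case1 seen =>
    intro hSeen hStack x hx
    rw [reachLoop] at hx
    exact hSeen x (by simpa using hx)
  | case2 seen stack h u st ih =>
    intro hSeen hStack x hx
    rw [reachLoop] at hx
    simp only [h, dite_false] at hx
    obtain ⟨f1, f2⟩ := reachFold_char (pvGetD adjacency (stack.getLast h)) (seen, stack.dropLast)
    have hlast : PvReach adjacency S (stack.getLast h) :=
      hStack _ (List.getLast_mem h)
    refine ih ?_ ?_ x hx
    · intro v hv
      rcases (f1 v).mp hv with hs | hn
      · exact hSeen v hs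
      · exact .step _ v hlast hn
    · intro v hv
      rcases (f2 v).mp hv with hs | hn
      · exact hStack v (List.mem_of_mem_dropLast hs)
      · exact .step _ v hlast hn.1

lemma reach_char (start : String) (adjacency : List (String × List String)) (x : String) :
    x ∈ pvReachable start adjacency ↔ PvReach adjacency [start] x := by
  have hVmem : ∀ y, y ∈ PySem.Set.add PySem.Set.empty start ↔ y = start := by
    intro y
    rw [PySem.Set.mem_add]
    simp [PySem.Set.empty]
  unfold pvReachable
  constructor
  · intro hx
    refine reachLoop_sound adjacency [start] _ _ ?_ ?_ x hx
    · intro u hu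
      exact .base u (by simpa using (hVmem u).mp hu)
    · intro u hu
      exact .base u hu
  · intro hx
    refine reachLoop_complete adjacency _ _ ?_ x ?_
    · intro v hv
      left
      simp [(hVmem v).mp hv]
    · exact PvReach_mono adjacency [start] _
        (fun y hy => (hVmem y).mpr (by simpa using hy)) x hx

-- membership of B's inner edge-building fold
lemma mem_addFold (f : String → String × String) (vs : List String) :
    ∀ (es : PySem.Set (String × String)) (e : String × String),
    e ∈ vs.foldl (fun es v => PySem.Set.add es (f v)) es ↔ e ∈ es ∨ ∃ v ∈ vs, e = f v := by
  induction vs with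
  | nil => simp
  | cons v vs ih =>
    intro es e
    simp only [List.foldl_cons]
    rw [ih (PySem.Set.add es (f v)) e, PySem.Set.mem_add]
    simp only [List.mem_cons]
    constructor
    · rintro ((h | rfl) | ⟨w, hw, rfl⟩)
      · exact Or.inl h
      · exact Or.inr ⟨v, Or.inl rfl, rfl⟩
      · exact Or.inr ⟨w, Or.inr hw, rfl⟩
    · rintro (h | ⟨w, (rfl | hw), rfl⟩)
      · exact Or.inl (Or.inl h)
      · exact Or.inl (Or.inr rfl)
      · exact Or.inr ⟨w, hw, rfl⟩

-- membership of B's outer edge-building fold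
lemma mem_edgeFold (g : String → String → String × String)
    (adj : List (String × List String)) (us : List String) :
    ∀ (es : PySem.Set (String × String)) (e : String × String),
    e ∈ us.foldl (fun es u => (pvGetD adj u).foldl
        (fun es v => PySem.Set.add es (g u v)) es) es ↔
    e ∈ es ∨ ∃ u ∈ us, ∃ v ∈ pvGetD adj u, e = g u v := by
  induction us with
  | nil => simp
  | cons u us ih =>
    intro es e
    simp only [List.foldl_cons]
    rw [ih _ e, mem_addFold (g u) (pvGetD adj u) es e]
    simp only [List.mem_cons]
    constructor
    · rintro ((h | ⟨v, hv, rfl⟩) | ⟨w, hw, v, hv, rfl⟩)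
      · exact Or.inl h
      · exact Or.inr ⟨u, Or.inl rfl, v, hv, rfl⟩
      · exact Or.inr ⟨w, Or.inr hw, v, hv, rfl⟩
    · rintro (h | ⟨w, (rfl | hw), v, hv, rfl⟩)
      · exact Or.inl (Or.inl h)
      · exact Or.inl (Or.inr ⟨v, hv, rfl⟩)
      · exact Or.inr ⟨w, hw, v, hv, rfl⟩

lemma nodup_addFold (f : String → String × String) (vs : List String) :
    ∀ es : PySem.Set (String × String), es.Nodup →
    (vs.foldl (fun es v => PySem.Set.add es (f v)) es).Nodup := by
  induction vs with
  | nil => exact fun es h => h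
  | cons v vs ih =>
    intro es h
    exact ih _ (PySem.Set.nodup_add es (f v) h)

lemma nodup_edgeFold (g : String → String → String × String)
    (adj : List (String × List String)) (us : List String) :
    ∀ es : PySem.Set (String × String), es.Nodup →
    (us.foldl (fun es u => (pvGetD adj u).foldl
        (fun es v => PySem.Set.add es (g u v)) es) es).Nodup := by
  induction us with
  | nil => exact fun es h => h
  | cons u us ih =>
    intro es h
    exact ih _ (nodup_addFold (g u) (pvGetD adj u) es h)

-- sorted2 on pairs is stable sort by the lexicographic key
lemma sorted2_eq_sorted_lex (xs : List (String × String)) :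
    PySem.List.sorted2 xs Prod.fst Prod.snd = PySem.List.sorted xs (fun p => toLex p) := by
  simp only [PySem.List.sorted2, PySem.List.sorted]
  have hbf : (fun (a b : String × String) =>
      decide (a.1 < b.1) || (!decide (b.1 < a.1) && decide (a.2 < b.2)))
      = fun a b => decide (toLex a < toLex b) := by
    funext a b
    rcases lt_trichotomy a.1 b.1 with h | h | h
    · simp [Prod.Lex.lt_iff, h, lt_asymm h]
    · simp [Prod.Lex.lt_iff, h]
    · simp [Prod.Lex.lt_iff, h, lt_asymm h, h.ne']
  rw [hbf]
  simp

lemma sorted2_eq_of_mem_nodup (xs ys : List (String × String))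
    (hx : xs.Nodup) (hy : ys.Nodup) (h : ∀ e, e ∈ xs ↔ e ∈ ys) :
    PySem.List.sorted2 xs Prod.fst Prod.snd = PySem.List.sorted2 ys Prod.fst Prod.snd := by
  rw [sorted2_eq_sorted_lex, sorted2_eq_sorted_lex]
  exact PySem.List.sorted_eq_sorted_of_perm xs ys _
    (fun a b hab => by simpa using congrArg ofLex hab)
    ((List.perm_ext_iff_of_nodup hx hy).mpr h)

-- ===== VERDICT (by name: the statement is the Claim_ definition above) =====
theorem collect_all_edges_for_node_spec : Claim_equal_collect_all_edges_for_node := by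
  intro node_id outgoing incoming _
  unfold Spec_collect_all_edges_for_node
  unfold collect_all_edges_for_node collect_all_edges_for_node_alt
  refine congrArg _ (sorted2_eq_of_mem_nodup _ _ ?_ ?_ ?_)
  · exact PySem.Set.nodup_update _ _
      (PySem.Set.nodup_update _ _ List.nodup_nil)
  · exact nodup_edgeFold (fun u v => (v, u)) incoming _ _
      (nodup_edgeFold (fun u v => (u, v)) outgoing _ _ List.nodup_nil)
  · intro e
    rw [PySem.Set.mem_update, PySem.Set.mem_update]
    rw [mem_edgeFold (fun u v => (v, u)) incoming, mem_edgeFold (fun u v => (u, v)) outgoing]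
    rw [cte_char, cte_char]
    simp only [reach_char, PySem.Set.empty, List.not_mem_nil, false_or, pvEdgeOf]
    simp
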